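-- pv_equiv track=rewrite | github.com/jeredhiggins/KeyIntentNER-T | app.py | sort_by_keyword_feature
-- ===== SOURCE A (Python) =====
-- def sort_by_keyword_feature(f):
--     if type(f) != str:
--         return "other"
--     f = f.lower()
--
--     informational_keywords = [
--         "advice", "help", "how do i", "how does", "how to", "ideas", "information", "tools", "list",
--         "resources", "tips", "tutorial", "diy", "ways to", "what does", "what is", "what was", "where are", "where does",
--         "where can", "where is", "where was", "when is", "when are", "when was", "where to", "who is", "who said", "who wrote",
--         "who are", "why are", "who was", "why is", "examples", "explained", "meaning of", "definition", "benefits of", "uses of",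
--         "overview", "summary", "report", "study",  "analysis", "research", "insight", "data", "facts", "details", "background",
--         "context", "news", "history", "documentation", "article", "paper", "blog", "forum", "discussion", "commentary",
--         "opinion", "perspective", "viewpoint", "guide", "difference between", "types of"
--     ]
--
--     navigational_keywords = [
--         "facebook", "meta", "twitter", "site", "login", "account", "official website", "homepage", "portal",
--         "signin", "register", "signup", "dashboard", "profile", "settings", "control panel", "main page",
--         "user area", "admin", "control", "access", "entry", "webpage", "navigate", "home", "site map",
--         "directory", "find", "search", "lookup", "index", "online", "internet", "web", "browser", "navigate to",
--         "goto", "landing page", "url", "hyperlink", "link", "web address", "navigate",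
--         "web navigation", "website address", "app", "download", "status", "join"
--     ]
--
--     local_keywords = [
--         "closest", "close", "near me", "my area", "residential", "my zip", "my city", "nearby", "in town",
--         "around here", "local", "near", "vicinity", "local area", "nearest", "surrounding", "within miles",
--         "in my neighborhood", "district", "zone", "region", "near my location", "local services", "community",
--         "local shop", "in my vicinity", "local store", "suburb", "urban area", "within walking distance",
--         "around my place", "within my reach", "close by", "local office", "local branch", "near me now",
--         "in my locale", "within the city", "local market", "in my town", "local spot", "local point",
--         "local guide", "near my house", "local venue", "close to me", "within blocks", "local attractions",
--         "local events", "address"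
--     ]
--
--     commercial_keywords = [
--         "best", "affordable", "budget", "cheap", "expensive", "review", "top", "service", "cost", "average cost",
--         "calculator", "provider", "company", "vs", "companies", "professional", "specialist", "compare",
--         "comparison", "rating", "testimonials", "recommendation", "advisor", "consultant", "expert", "ranking",
--         "leader", "top-rated", "best-selling", "trending", "featured", "highlighted", "recommended", "popular",
--         "favorite", "preferred", "choice", "most reviewed", "highest rated", "highly recommended", "award-winning",
--         "five-star", "customer favorite", "top pick", "critically acclaimed", "editor's choice", "people's choice",
--         "top performer", "best value", "best overall", "best quality", "best price", "most trusted", "leading brand",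
--         "popular choice", "most popular", "fees", "pros and cons"
--     ]
--
--     transactional_keywords = [
--         "price", "quotes", "pricing", "purchase", "rates", "how much", "same day", "same-day", "buy", "order",
--         "discount", "deal", "offers", "sale", "checkout", "book", "reservation", "reserve", "bargain", "coupon",
--         "promo", "rebate", "clearance", "markdown", "buy one get one", "bogo", "special", "exclusive", "bundle",
--         "package", "subscription", "membership", "payment", "installment", "financing", "contract", "billing",
--         "invoice", "ticket", "admission", "entry", "enrollment", "register", "sign up", "pre-order", "e-commerce",
--         "shopping cart"
--     ]
--
--     if any(keyword in f for keyword in informational_keywords):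
--         return "informational"
--     if any(keyword in f for keyword in navigational_keywords):
--         return "navigational"
--     if any(keyword in f for keyword in local_keywords):
--         return "local"
--     if any(keyword in f for keyword in commercial_keywords):
--         return "commercial investigation"
--     if any(keyword in f for keyword in transactional_keywords):
--         return "transactional"
--
--     return "other"
-- ===== SOURCE B (Python) =====
-- def sort_by_keyword_feature(f):
--     if type(f) != str:
--         return "other"
--     f = f.lower()
--
--     # the same keyword tables as A, in priority order, each packed as one
--     # '|'-joined string and split at runtime
--     tables = [
--         'advice|help|how do i|how does|how to|ideas|information|tools|list|resources|tips|tutorial|diy|ways to|what does|what is|what was|where are|where does|where can|where is|where was|when is|when are|when was|where to|who is|who said|who wrote|who are|why are|who was|why is|examples|explained|meaning of|definition|benefits of|uses of|overview|summary|report|study|analysis|research|insight|data|facts|details|background|context|news|history|documentation|article|paper|blog|forum|discussion|commentary|opinion|perspective|viewpoint|guide|difference between|types of',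
--         'facebook|meta|twitter|site|login|account|official website|homepage|portal|signin|register|signup|dashboard|profile|settings|control panel|main page|user area|admin|control|access|entry|webpage|navigate|home|site map|directory|find|search|lookup|index|online|internet|web|browser|navigate to|goto|landing page|url|hyperlink|link|web address|navigate|web navigation|website address|app|download|status|join',
--         'closest|close|near me|my area|residential|my zip|my city|nearby|in town|around here|local|near|vicinity|local area|nearest|surrounding|within miles|in my neighborhood|district|zone|region|near my location|local services|community|local shop|in my vicinity|local store|suburb|urban area|within walking distance|around my place|within my reach|close by|local office|local branch|near me now|in my locale|within the city|local market|in my town|local spot|local point|local guide|near my house|local venue|close to me|within blocks|local attractions|local events|address',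
--         "best|affordable|budget|cheap|expensive|review|top|service|cost|average cost|calculator|provider|company|vs|companies|professional|specialist|compare|comparison|rating|testimonials|recommendation|advisor|consultant|expert|ranking|leader|top-rated|best-selling|trending|featured|highlighted|recommended|popular|favorite|preferred|choice|most reviewed|highest rated|highly recommended|award-winning|five-star|customer favorite|top pick|critically acclaimed|editor's choice|people's choice|top performer|best value|best overall|best quality|best price|most trusted|leading brand|popular choice|most popular|fees|pros and cons",
--         'price|quotes|pricing|purchase|rates|how much|same day|same-day|buy|order|discount|deal|offers|sale|checkout|book|reservation|reserve|bargain|coupon|promo|rebate|clearance|markdown|buy one get one|bogo|special|exclusive|bundle|package|subscription|membership|payment|installment|financing|contract|billing|invoice|ticket|admission|entry|enrollment|register|sign up|pre-order|e-commerce|shopping cart',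
--     ]
--     labels = ["informational", "navigational", "local", "commercial investigation", "transactional"]
--
--     # bucket the (keyword, priority-rank) table by first character
--     buckets = {}
--     for rank, tbl in enumerate(tables):
--         for kw in tbl.split("|"):
--             buckets.setdefault(kw[0], []).append((kw, rank))
--
--     # single left-to-right scan over the query: at each position keep the best
--     # (lowest) rank of any keyword starting there (only keywords whose first
--     # character is the character at that position can start there)
--     best = len(labels)
--     for i in range(len(f)):
--         for kw, rank in buckets.get(f[i], ()):
--             if rank < best and f.startswith(kw, i):
--                 best = rank
--     return labels[best] if best < len(labels) else "other"
-- ===== Notes on version B (the rewrite author's own statement) =====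
-- stated objective: alternative
-- what changed: A runs five separate early-return category checks, each scanning the whole query per keyword with `kw in f`; B stores each category's keywords packed in one delimiter-joined string, splits them at startup into a dict bucketing (keyword, priority-rank) pairs by first character, and makes a single left-to-right scan over the query's positions, trying only the bucket of the character at each position and keeping the minimal matched rank, which it maps to its label.
import Mathlib
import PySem

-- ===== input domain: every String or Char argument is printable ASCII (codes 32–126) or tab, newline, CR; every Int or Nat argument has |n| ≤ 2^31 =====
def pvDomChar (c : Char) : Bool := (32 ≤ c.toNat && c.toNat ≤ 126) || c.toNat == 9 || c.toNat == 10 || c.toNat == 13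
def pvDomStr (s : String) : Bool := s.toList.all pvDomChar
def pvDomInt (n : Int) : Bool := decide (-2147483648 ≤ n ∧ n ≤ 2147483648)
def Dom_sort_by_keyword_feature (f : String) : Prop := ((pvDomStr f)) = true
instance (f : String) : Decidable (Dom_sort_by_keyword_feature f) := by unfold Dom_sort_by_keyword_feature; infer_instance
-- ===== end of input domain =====

-- B replaces A's five per-category `any(kw in f)` scans by ONE left-to-right scan over the
-- query's positions against a dict bucketing the (keyword, rank) table (packed as '|'-joined
-- strings, split at runtime) by first character, keeping the minimal matched rank
-- (alternative algorithm, same result).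



-- ===== PORT A =====
-- the five keyword lists of A, verbatim
def kwInfo : List String := [
  "advice", "help", "how do i", "how does", "how to", "ideas", "information", "tools", "list", "resources",
  "tips", "tutorial", "diy", "ways to", "what does", "what is", "what was", "where are", "where does",
  "where can", "where is", "where was", "when is", "when are", "when was", "where to", "who is", "who said",
  "who wrote", "who are", "why are", "who was", "why is", "examples", "explained", "meaning of", "definition",
  "benefits of", "uses of", "overview", "summary", "report", "study", "analysis", "research", "insight",
  "data", "facts", "details", "background", "context", "news", "history", "documentation", "article", "paper",
  "blog", "forum", "discussion", "commentary", "opinion", "perspective", "viewpoint", "guide",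
  "difference between", "types of"]

def kwNav : List String := [
  "facebook", "meta", "twitter", "site", "login", "account", "official website", "homepage", "portal",
  "signin", "register", "signup", "dashboard", "profile", "settings", "control panel", "main page",
  "user area", "admin", "control", "access", "entry", "webpage", "navigate", "home", "site map", "directory",
  "find", "search", "lookup", "index", "online", "internet", "web", "browser", "navigate to", "goto",
  "landing page", "url", "hyperlink", "link", "web address", "navigate", "web navigation", "website address",
  "app", "download", "status", "join"]

def kwLocal : List String := [
  "closest", "close", "near me", "my area", "residential", "my zip", "my city", "nearby", "in town",
  "around here", "local", "near", "vicinity", "local area", "nearest", "surrounding", "within miles",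
  "in my neighborhood", "district", "zone", "region", "near my location", "local services", "community",
  "local shop", "in my vicinity", "local store", "suburb", "urban area", "within walking distance",
  "around my place", "within my reach", "close by", "local office", "local branch", "near me now",
  "in my locale", "within the city", "local market", "in my town", "local spot", "local point", "local guide",
  "near my house", "local venue", "close to me", "within blocks", "local attractions", "local events",
  "address"]

def kwComm : List String := [
  "best", "affordable", "budget", "cheap", "expensive", "review", "top", "service", "cost", "average cost",
  "calculator", "provider", "company", "vs", "companies", "professional", "specialist", "compare",
  "comparison", "rating", "testimonials", "recommendation", "advisor", "consultant", "expert", "ranking",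
  "leader", "top-rated", "best-selling", "trending", "featured", "highlighted", "recommended", "popular",
  "favorite", "preferred", "choice", "most reviewed", "highest rated", "highly recommended", "award-winning",
  "five-star", "customer favorite", "top pick", "critically acclaimed", "editor's choice", "people's choice",
  "top performer", "best value", "best overall", "best quality", "best price", "most trusted",
  "leading brand", "popular choice", "most popular", "fees", "pros and cons"]

def kwTrans : List String := [
  "price", "quotes", "pricing", "purchase", "rates", "how much", "same day", "same-day", "buy", "order",
  "discount", "deal", "offers", "sale", "checkout", "book", "reservation", "reserve", "bargain", "coupon",
  "promo", "rebate", "clearance", "markdown", "buy one get one", "bogo", "special", "exclusive", "bundle",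
  "package", "subscription", "membership", "payment", "installment", "financing", "contract", "billing",
  "invoice", "ticket", "admission", "entry", "enrollment", "register", "sign up", "pre-order", "e-commerce",
  "shopping cart"]

-- A: lower the query, then five early-return `any(keyword in f)` checks in priority order.
-- (Python's `type(f) != str` guard is dead here: f : String.)
def sort_by_keyword_feature (f : String) : String :=
  let fl := PySem.Str.lower f
  if kwInfo.any (fun k => PySem.Str.isIn k fl) then "informational"
  else if kwNav.any (fun k => PySem.Str.isIn k fl) then "navigational"
  else if kwLocal.any (fun k => PySem.Str.isIn k fl) then "local"
  else if kwComm.any (fun k => PySem.Str.isIn k fl) then "commercial investigation"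
  else if kwTrans.any (fun k => PySem.Str.isIn k fl) then "transactional"
  else "other"

-- ===== PORT B =====
-- B's keyword data: one '|'-joined string per category, split at runtime (tbl.split("|") is
-- ported as PySem.Str.split?, which is `some` for the non-empty separator "|" — the getD [] default is never taken)
def tblInfo : String := "advice|help|how do i|how does|how to|ideas|information|tools|list|resources|tips|tutorial|diy|ways to|what does|what is|what was|where are|where does|where can|where is|where was|when is|when are|when was|where to|who is|who said|who wrote|who are|why are|who was|why is|examples|explained|meaning of|definition|benefits of|uses of|overview|summary|report|study|analysis|research|insight|data|facts|details|background|context|news|history|documentation|article|paper|blog|forum|discussion|commentary|opinion|perspective|viewpoint|guide|difference between|types of"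
def tblNav : String := "facebook|meta|twitter|site|login|account|official website|homepage|portal|signin|register|signup|dashboard|profile|settings|control panel|main page|user area|admin|control|access|entry|webpage|navigate|home|site map|directory|find|search|lookup|index|online|internet|web|browser|navigate to|goto|landing page|url|hyperlink|link|web address|navigate|web navigation|website address|app|download|status|join"
def tblLocal : String := "closest|close|near me|my area|residential|my zip|my city|nearby|in town|around here|local|near|vicinity|local area|nearest|surrounding|within miles|in my neighborhood|district|zone|region|near my location|local services|community|local shop|in my vicinity|local store|suburb|urban area|within walking distance|around my place|within my reach|close by|local office|local branch|near me now|in my locale|within the city|local market|in my town|local spot|local point|local guide|near my house|local venue|close to me|within blocks|local attractions|local events|address"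
def tblComm : String := "best|affordable|budget|cheap|expensive|review|top|service|cost|average cost|calculator|provider|company|vs|companies|professional|specialist|compare|comparison|rating|testimonials|recommendation|advisor|consultant|expert|ranking|leader|top-rated|best-selling|trending|featured|highlighted|recommended|popular|favorite|preferred|choice|most reviewed|highest rated|highly recommended|award-winning|five-star|customer favorite|top pick|critically acclaimed|editor's choice|people's choice|top performer|best value|best overall|best quality|best price|most trusted|leading brand|popular choice|most popular|fees|pros and cons"
def tblTrans : String := "price|quotes|pricing|purchase|rates|how much|same day|same-day|buy|order|discount|deal|offers|sale|checkout|book|reservation|reserve|bargain|coupon|promo|rebate|clearance|markdown|buy one get one|bogo|special|exclusive|bundle|package|subscription|membership|payment|installment|financing|contract|billing|invoice|ticket|admission|entry|enrollment|register|sign up|pre-order|e-commerce|shopping cart"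

def pvCatsB : List (List String) :=
  [tblInfo, tblNav, tblLocal, tblComm, tblTrans].map (fun t => (PySem.Str.split? t "|").getD [])
def pvLabels : List String := ["informational", "navigational", "local", "commercial investigation", "transactional"]

-- B: one scan over the query's positions; at each position try only the bucket of table
-- entries whose keyword starts with the character there (`f.startswith(kw, i)` is ported as
-- startswith on List.drop — exact: i ∈ range(len f) is a valid non-negative index, so
-- range(len(f)) is ported as List.range over Nat indices, f[i] as List.getD, and kw[0] as
-- headD — exact: every keyword is non-empty).
def sort_by_keyword_feature_alt (f : String) : String :=
  let s := (PySem.Str.lower f).toList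
  let buckets : PySem.Dict Char (List (String × Int)) :=
    (PySem.List.enumerate pvCatsB 0).foldl (fun d p =>
      p.2.foldl (fun d kw =>
        d.insert (kw.toList.headD ' ') (d.getD (kw.toList.headD ' ') [] ++ [(kw, p.1)])) d)
      PySem.Dict.empty
  let best : Int := (List.range s.length).foldl
    (fun b i => (buckets.getD (s.getD i ' ') []).foldl
      (fun b p => if p.2 < b ∧ PySem.Chars.startswith (List.drop i s) p.1.toList = true then p.2 else b) b) 5
  if best < 5 then PySem.List.pyGetD pvLabels best "" else "other"

-- ===== PRECONDITION & SPEC =====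
def Spec_sort_by_keyword_feature (f : String) (out : String) : Prop := out = sort_by_keyword_feature_alt f
instance (f : String) (out : String) : Decidable (Spec_sort_by_keyword_feature f out) := by unfold Spec_sort_by_keyword_feature; infer_instance

-- ===== CLAIM (what is proved, stated in full; the proofs are below) =====
def Claim_equal_sort_by_keyword_feature : Prop := ∀ (f : String), Dom_sort_by_keyword_feature f → Spec_sort_by_keyword_feature f (sort_by_keyword_feature f)

-- ===== LEMMAS AND PROOFS =====

-- proof-side view of the categories in list form, and the bridge to B's packed strings
def pvCats : List (List String) := [kwInfo, kwNav, kwLocal, kwComm, kwTrans]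

-- splitting a '|'-joined string recovers the words: proved once generically (pv_go_* / pv_split_cat),
-- so the per-category facts below only need cheap String-level evaluations

def pvJoin (c : Char) : List (List Char) → List Char
  | [] => []
  | [w] => w
  | w :: ws => w ++ c :: pvJoin c ws

def pvJoinS (sep : String) : List String → String
  | [] => ""
  | [w] => w
  | w :: ws => w ++ sep ++ pvJoinS sep ws

theorem pvJoinS_toList (ws : List String) : (pvJoinS "|" ws).toList = pvJoin '|' (ws.map String.toList) := by
  induction ws with
  | nil => simp [pvJoinS, pvJoin]
  | cons w ws ih =>
    cases ws with
    | nil => simp [pvJoinS, pvJoin]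
    | cons w2 ws' =>
      show ((w ++ "|") ++ pvJoinS "|" (w2 :: ws')).toList = _
      simp only [String.toList_append, ih]
      rw [show ("|".toList) = ['|'] from rfl]
      show _ = _ ++ '|' :: pvJoin '|' (List.map String.toList (w2 :: ws'))
      simp [List.append_assoc]

theorem pv_go_nil (sep : List Char) (fuel : Nat) (cur : List Char) (acc : List (List Char)) :
    PySem.Chars.splitOn.go sep fuel [] cur acc = (cur.reverse :: acc).reverse := by
  cases fuel <;> simp [PySem.Chars.splitOn.go]

theorem pv_go_word (c : Char) (w rest : List Char) (hw : c ∉ w) (fuel : Nat) (cur : List Char)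
    (acc : List (List Char)) (hfuel : (w ++ rest).length ≤ fuel) :
    PySem.Chars.splitOn.go [c] fuel (w ++ rest) cur acc
    = PySem.Chars.splitOn.go [c] (fuel - w.length) rest (w.reverse ++ cur) acc := by
  induction w generalizing fuel cur with
  | nil => simp
  | cons a w' ih =>
    cases fuel with
    | zero => simp at hfuel
    | succ f =>
      have hca : (c == a) = false := by
        simp only [List.mem_cons, not_or] at hw
        simp [hw.1]
      have hpre : List.isPrefixOf [c] (a :: (w' ++ rest)) = false := by
        simp [List.isPrefixOf, hca]
      simp only [List.cons_append, PySem.Chars.splitOn.go, hpre, Bool.false_eq_true, if_false]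
      have hw' : c ∉ w' := fun h => hw (List.mem_cons_of_mem _ h)
      rw [ih hw' f (a :: cur) (by simp at hfuel ⊢; omega)]
      simp [List.append_assoc]

theorem pv_go_sep (c : Char) (rest : List Char) (fuel : Nat) (cur : List Char) (acc : List (List Char)) :
    PySem.Chars.splitOn.go [c] (fuel + 1) (c :: rest) cur acc
    = PySem.Chars.splitOn.go [c] fuel rest [] (cur.reverse :: acc) := by
  simp [PySem.Chars.splitOn.go, List.isPrefixOf]

theorem pv_go_join (c : Char) (ws : List (List Char)) (hws : ws ≠ []) (h : ∀ w ∈ ws, c ∉ w)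
    (acc : List (List Char)) (fuel : Nat) (hfuel : (pvJoin c ws).length + 1 ≤ fuel) :
    PySem.Chars.splitOn.go [c] fuel (pvJoin c ws) [] acc = acc.reverse ++ ws := by
  induction ws generalizing acc fuel with
  | nil => exact absurd rfl hws
  | cons w ws' ih =>
    cases ws' with
    | nil =>
      have hj : pvJoin c [w] = w := rfl
      rw [hj] at hfuel ⊢
      have hgw := pv_go_word c w [] (h w (List.mem_cons_self ..)) fuel [] acc (by simp; omega)
      simp only [List.append_nil] at hgw
      rw [hgw, pv_go_nil]
      simp
    | cons w2 ws'' =>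
      have hj : pvJoin c (w :: w2 :: ws'') = w ++ c :: pvJoin c (w2 :: ws'') := rfl
      rw [hj] at hfuel ⊢
      rw [pv_go_word c w (c :: pvJoin c (w2 :: ws'')) (h w (List.mem_cons_self ..)) fuel [] acc (by omega)]
      have hlen : (w ++ c :: pvJoin c (w2 :: ws'')).length = w.length + 1 + (pvJoin c (w2 :: ws'')).length := by
        simp; omega
      obtain ⟨f, hf⟩ : ∃ f, fuel - w.length = f + 1 := ⟨fuel - w.length - 1, by rw [hlen] at hfuel; omega⟩
      rw [hf, pv_go_sep]
      rw [ih (by simp) (fun w' hw' => h w' (List.mem_cons_of_mem _ hw')) _ f (by rw [hlen] at hfuel; omega)]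
      simp

theorem pv_split_cat (t : String) (kws : List String) (hne : kws ≠ [])
    (h1 : t = pvJoinS "|" kws)
    (h2 : ∀ w ∈ kws, '|' ∉ w.toList) :
    (PySem.Str.split? t "|").getD [] = kws := by
  have h1' : t.toList = pvJoin '|' (kws.map String.toList) := by rw [h1]; exact pvJoinS_toList kws
  unfold PySem.Str.split? PySem.Chars.split?
  have hsep : ("|".toList) = ['|'] := rfl
  rw [hsep]
  simp only [List.isEmpty_cons]
  unfold PySem.Chars.splitOn
  rw [h1', pv_go_join '|' (kws.map String.toList) (by simpa using hne)
    (by intro w hw; obtain ⟨s, hs, rfl⟩ := List.mem_map.mp hw; exact h2 s hs) [] _ (by omega)]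
  simp [List.map_map, Function.comp_def, String.ofList]

set_option maxRecDepth 1000000 in
set_option maxHeartbeats 8000000 in
theorem pv_cat_info : (PySem.Str.split? tblInfo "|").getD [] = kwInfo :=
  pv_split_cat _ _ (by decide) (by decide) (by decide)

set_option maxRecDepth 1000000 in
set_option maxHeartbeats 8000000 in
theorem pv_cat_nav : (PySem.Str.split? tblNav "|").getD [] = kwNav :=
  pv_split_cat _ _ (by decide) (by decide) (by decide)

set_option maxRecDepth 1000000 in
set_option maxHeartbeats 8000000 in
theorem pv_cat_local : (PySem.Str.split? tblLocal "|").getD [] = kwLocal :=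
  pv_split_cat _ _ (by decide) (by decide) (by decide)

set_option maxRecDepth 1000000 in
set_option maxHeartbeats 8000000 in
theorem pv_cat_comm : (PySem.Str.split? tblComm "|").getD [] = kwComm :=
  pv_split_cat _ _ (by decide) (by decide) (by decide)

set_option maxRecDepth 1000000 in
set_option maxHeartbeats 8000000 in
theorem pv_cat_trans : (PySem.Str.split? tblTrans "|").getD [] = kwTrans :=
  pv_split_cat _ _ (by decide) (by decide) (by decide)

theorem pvCatsB_eq : pvCatsB = pvCats := by
  unfold pvCatsB pvCats
  simp only [List.map_cons, List.map_nil, pv_cat_info, pv_cat_nav, pv_cat_local, pv_cat_comm, pv_cat_trans]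

-- inner fold: minimum of b and the matched ranks of t
theorem pv_inner_char (t : List (String × Int)) (q : String × Int → Bool) (b : Int) :
    t.foldl (fun b p => if p.2 < b ∧ q p = true then p.2 else b) b ≤ b ∧
    (t.foldl (fun b p => if p.2 < b ∧ q p = true then p.2 else b) b = b ∨
      ∃ p ∈ t, q p = true ∧ t.foldl (fun b p => if p.2 < b ∧ q p = true then p.2 else b) b = p.2) ∧
    (∀ p ∈ t, q p = true → t.foldl (fun b p => if p.2 < b ∧ q p = true then p.2 else b) b ≤ p.2) := by
  induction t generalizing b with
  | nil => simp
  | cons hd tl ih =>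
    simp only [List.foldl_cons]
    by_cases hc : hd.2 < b ∧ q hd = true
    · rw [if_pos hc]
      obtain ⟨ih1, ih2, ih3⟩ := ih hd.2
      refine ⟨le_trans ih1 (le_of_lt hc.1), ?_, ?_⟩
      · rcases ih2 with h | ⟨p, hp, hq, he⟩
        · exact Or.inr ⟨hd, List.mem_cons_self .., hc.2, h⟩
        · exact Or.inr ⟨p, List.mem_cons_of_mem _ hp, hq, he⟩
      · intro p hp hq
        rcases List.mem_cons.mp hp with rfl | hp'
        · exact ih1
        · exact ih3 p hp' hq
    · rw [if_neg hc]
      obtain ⟨ih1, ih2, ih3⟩ := ih b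
      refine ⟨ih1, ?_, ?_⟩
      · rcases ih2 with h | ⟨p, hp, hq, he⟩
        · exact Or.inl h
        · exact Or.inr ⟨p, List.mem_cons_of_mem _ hp, hq, he⟩
      · intro p hp hq
        rcases List.mem_cons.mp hp with rfl | hp'
        · rcases not_and_or.mp hc with h' | h'
          · exact le_trans ih1 (le_of_not_gt h')
          · exact absurd hq h'
        · exact ih3 p hp' hq

-- outer fold over positions: minimum of b and the ranks matched at some position of l
theorem pv_scan_char (t : List (String × Int)) (P : String × Int → Nat → Bool)
    (l : List Nat) (b : Int) :
    l.foldl (fun b i => t.foldl (fun b p => if p.2 < b ∧ P p i = true then p.2 else b) b) b ≤ b ∧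
    (l.foldl (fun b i => t.foldl (fun b p => if p.2 < b ∧ P p i = true then p.2 else b) b) b = b ∨
      ∃ p ∈ t, (∃ i ∈ l, P p i = true) ∧
        l.foldl (fun b i => t.foldl (fun b p => if p.2 < b ∧ P p i = true then p.2 else b) b) b = p.2) ∧
    (∀ p ∈ t, (∃ i ∈ l, P p i = true) →
      l.foldl (fun b i => t.foldl (fun b p => if p.2 < b ∧ P p i = true then p.2 else b) b) b ≤ p.2) := by
  induction l generalizing b with
  | nil => simp
  | cons hd tl ih =>
    simp only [List.foldl_cons]
    set b' := t.foldl (fun b p => if p.2 < b ∧ P p hd = true then p.2 else b) b with hb'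
    obtain ⟨in1, in2, in3⟩ := pv_inner_char t (fun p => P p hd) b
    obtain ⟨ih1, ih2, ih3⟩ := ih b'
    refine ⟨le_trans ih1 in1, ?_, ?_⟩
    · rcases ih2 with h | ⟨p, hp, ⟨i, hi, hPi⟩, he⟩
      · rw [h]
        rcases in2 with h2 | ⟨p, hp, hq, he⟩
        · exact Or.inl h2
        · exact Or.inr ⟨p, hp, ⟨hd, List.mem_cons_self .., hq⟩, he⟩
      · exact Or.inr ⟨p, hp, ⟨i, List.mem_cons_of_mem _ hi, hPi⟩, he⟩
    · intro p hp ⟨i, hi, hPi⟩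
      rcases List.mem_cons.mp hi with rfl | hi'
      · exact le_trans ih1 (in3 p hp hPi)
      · exact ih3 p hp ⟨i, hi', hPi⟩

-- proof-side view of B's buckets: the flattened (keyword, rank) table and the bucket key
def pvTable : List (String × Int) :=
  (PySem.List.enumerate pvCats 0).foldl (fun acc p => acc ++ p.2.map (fun kw => (kw, p.1))) []

def pvKey (p : String × Int) : Char := p.1.toList.headD ' '

theorem pvTable_flatMap : pvTable =
    (PySem.List.enumerate pvCats 0).flatMap (fun p => p.2.map (fun kw => (kw, p.1))) := by
  unfold pvTable
  simpa using PySem.List.foldl_append_eq_flatMap (fun p : Int × List String => p.2.map (fun kw => (kw, p.1))) (PySem.List.enumerate pvCats 0) []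

-- a nested per-category loop is the same as one loop over the flattened table
theorem pv_nested_foldl {D : Type} (step : D → (String × Int) → D) (xs : List (Int × List String)) (d : D) :
    xs.foldl (fun d p => p.2.foldl (fun d kw => step d (kw, p.1)) d) d
    = (xs.flatMap (fun p => p.2.map (fun kw => (kw, p.1)))).foldl step d := by
  induction xs generalizing d with
  | nil => rfl
  | cons hd tl ih =>
    simp only [List.foldl_cons, List.flatMap_cons, List.foldl_append, List.foldl_map]
    exact ih _

-- the bucket build, specialised to B's step
theorem pv_buckets_foldl (xs : List (Int × List String)) (d : PySem.Dict Char (List (String × Int))) :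
    xs.foldl (fun d p => p.2.foldl (fun d kw =>
        d.insert (kw.toList.headD ' ') (d.getD (kw.toList.headD ' ') [] ++ [(kw, p.1)])) d) d
    = (xs.flatMap (fun p => p.2.map (fun kw => (kw, p.1)))).foldl
        (fun d q => d.insert (pvKey q) (d.getD (pvKey q) [] ++ [q])) d :=
  pv_nested_foldl (fun d q => d.insert (pvKey q) (d.getD (pvKey q) [] ++ [q])) xs d

-- what each bucket holds: the table entries with that first character, in table order
theorem pv_getD_bucket (l : List (String × Int)) (d : PySem.Dict Char (List (String × Int))) (c : Char) :
    (l.foldl (fun d q => d.insert (pvKey q) (d.getD (pvKey q) [] ++ [q])) d).getD c []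
    = d.getD c [] ++ l.filter (fun q => pvKey q == c) := by
  induction l generalizing d with
  | nil => simp
  | cons hd tl ih =>
    simp only [List.foldl_cons, List.filter_cons]
    rw [ih, PySem.Dict.getD_insert]
    by_cases h : pvKey hd = c
    · rw [if_pos h.symm]
      rw [h]
      simp [List.append_assoc]
    · rw [if_neg (fun e => h e.symm)]
      have hb : (pvKey hd == c) = false := by simp [h]
      simp [hb]

-- a keyword that starts at position i begins with the character at position i
theorem pv_startswith_key (s kw : List Char) (i : Nat) (hi : i < s.length) (hkw : kw ≠ [])
    (h : PySem.Chars.startswith (List.drop i s) kw = true) : kw.headD ' ' = s.getD i ' ' := by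
  obtain ⟨t, ht⟩ := (PySem.Chars.startswith_iff _ _).mp h
  rw [List.drop_eq_getElem_cons hi] at ht
  cases kw with
  | nil => exact absurd rfl hkw
  | cons a as =>
    rw [List.cons_append] at ht
    rw [List.getD_eq_getElem s ' ' hi]
    simpa using (List.cons_eq_cons.mp ht).1

theorem pvTable_eq : pvTable =
    kwInfo.map (fun k => (k, (0 : Int))) ++ kwNav.map (fun k => (k, (1 : Int))) ++
    kwLocal.map (fun k => (k, (2 : Int))) ++ kwComm.map (fun k => (k, (3 : Int))) ++
    kwTrans.map (fun k => (k, (4 : Int))) := by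
  simp [pvTable, pvCats, PySem.List.enumerate]

theorem mem_pvTable_iff (p : String × Int) : p ∈ pvTable ↔
    (p.1 ∈ kwInfo ∧ p.2 = 0) ∨ (p.1 ∈ kwNav ∧ p.2 = 1) ∨ (p.1 ∈ kwLocal ∧ p.2 = 2) ∨
    (p.1 ∈ kwComm ∧ p.2 = 3) ∨ (p.1 ∈ kwTrans ∧ p.2 = 4) := by
  obtain ⟨k, r⟩ := p
  simp only [pvTable_eq, List.mem_append, List.mem_map, Prod.mk.injEq]
  constructor
  · rintro ((((⟨k', hk, rfl, rfl⟩ | ⟨k', hk, rfl, rfl⟩) | ⟨k', hk, rfl, rfl⟩) | ⟨k', hk, rfl, rfl⟩) | ⟨k', hk, rfl, rfl⟩) <;> simp_all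
  · rintro (⟨hk, rfl⟩ | ⟨hk, rfl⟩ | ⟨hk, rfl⟩ | ⟨hk, rfl⟩ | ⟨hk, rfl⟩)
    · exact Or.inl (Or.inl (Or.inl (Or.inl ⟨k, hk, rfl, rfl⟩)))
    · exact Or.inl (Or.inl (Or.inl (Or.inr ⟨k, hk, rfl, rfl⟩)))
    · exact Or.inl (Or.inl (Or.inr ⟨k, hk, rfl, rfl⟩))
    · exact Or.inl (Or.inr ⟨k, hk, rfl, rfl⟩)
    · exact Or.inr ⟨k, hk, rfl, rfl⟩

set_option maxRecDepth 8192 in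
theorem pvTable_ne_nil_keys : ∀ p ∈ pvTable, p.1.toList ≠ [] := by decide

set_option maxRecDepth 8192 in
theorem pvTable_rank_nonneg : ∀ p ∈ pvTable, 0 ≤ p.2 := by decide

-- a keyword occurs as a substring iff it starts at some scanned position
theorem pv_exists_pos_iff_isIn (s kw : List Char) (h : kw ≠ []) :
    (∃ i ∈ List.range s.length, PySem.Chars.startswith (List.drop i s) kw = true) ↔
    PySem.Chars.isIn kw s = true := by
  rw [← PySem.Chars.exists_prefix_drop_iff_isIn]
  constructor
  · rintro ⟨i, _, hi⟩; exact ⟨i, (PySem.Chars.startswith_iff _ _).mp hi⟩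
  · rintro ⟨j, hj⟩
    by_cases hjl : j < s.length
    · exact ⟨j, List.mem_range.mpr hjl, (PySem.Chars.startswith_iff _ _).mpr hj⟩
    · exfalso
      rw [List.drop_eq_nil_of_le (le_of_not_gt hjl)] at hj
      exact h (List.prefix_nil.mp hj)

-- rank of every table entry is one of 0..4
theorem pvTable_rank_cases (p : String × Int) (hp : p ∈ pvTable) :
    p.2 = 0 ∨ p.2 = 1 ∨ p.2 = 2 ∨ p.2 = 3 ∨ p.2 = 4 := by
  rcases (mem_pvTable_iff p).mp hp with ⟨_, h⟩ | ⟨_, h⟩ | ⟨_, h⟩ | ⟨_, h⟩ | ⟨_, h⟩ <;> simp [h]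

-- the whole equivalence, with B's scan result abstracted as `best`
theorem pv_core (f : String) (best : Int)
    (hbest : best = (List.range (PySem.Str.lower f).toList.length).foldl
      (fun b i => (((PySem.List.enumerate pvCats 0).foldl (fun d p =>
          p.2.foldl (fun d kw =>
            d.insert (kw.toList.headD ' ') (d.getD (kw.toList.headD ' ') [] ++ [(kw, p.1)])) d)
          PySem.Dict.empty).getD ((PySem.Str.lower f).toList.getD i ' ') []).foldl
        (fun b p => if p.2 < b ∧ PySem.Chars.startswith (List.drop i (PySem.Str.lower f).toList) p.1.toList = true then p.2 else b) b) 5) :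
    (if kwInfo.any (fun k => PySem.Str.isIn k (PySem.Str.lower f)) then "informational"
     else if kwNav.any (fun k => PySem.Str.isIn k (PySem.Str.lower f)) then "navigational"
     else if kwLocal.any (fun k => PySem.Str.isIn k (PySem.Str.lower f)) then "local"
     else if kwComm.any (fun k => PySem.Str.isIn k (PySem.Str.lower f)) then "commercial investigation"
     else if kwTrans.any (fun k => PySem.Str.isIn k (PySem.Str.lower f)) then "transactional"
     else "other")
    = (if best < 5 then PySem.List.pyGetD pvLabels best "" else "other") := by
  set s : List Char := (PySem.Str.lower f).toList with hs
  have hflat : best = (List.range s.length).foldl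
      (fun b i => pvTable.foldl
        (fun b p => if p.2 < b ∧ ((pvKey p == s.getD i ' ') && PySem.Chars.startswith (List.drop i s) p.1.toList) = true then p.2 else b) b) 5 := by
    rw [hbest]
    have hstep : (fun (b : Int) (i : Nat) => (((PySem.List.enumerate pvCats 0).foldl (fun d p =>
          p.2.foldl (fun d kw =>
            d.insert (kw.toList.headD ' ') (d.getD (kw.toList.headD ' ') [] ++ [(kw, p.1)])) d)
          PySem.Dict.empty).getD (s.getD i ' ') []).foldl
        (fun b p => if p.2 < b ∧ PySem.Chars.startswith (List.drop i s) p.1.toList = true then p.2 else b) b)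
        = (fun (b : Int) (i : Nat) => pvTable.foldl
        (fun b p => if p.2 < b ∧ ((pvKey p == s.getD i ' ') && PySem.Chars.startswith (List.drop i s) p.1.toList) = true then p.2 else b) b) := by
      funext b i
      rw [pv_buckets_foldl, ← pvTable_flatMap,
          pv_getD_bucket, PySem.Dict.getD_empty, List.nil_append,
          ← PySem.List.foldl_if_eq_foldl_filter (fun q => (pvKey q == s.getD i ' '))
            (fun b (p : String × Int) => if p.2 < b ∧ PySem.Chars.startswith (List.drop i s) p.1.toList = true then p.2 else b) pvTable b]
      refine PySem.List.foldl_congr_mem _ _ _ _ (fun b p _ => ?_)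
      by_cases h1 : (pvKey p == s.getD i ' ') = true <;>
        by_cases h2 : p.2 < b <;>
          by_cases h3 : PySem.Chars.startswith (List.drop i s) p.1.toList = true <;>
            simp [h2, h3]
    rw [hstep]
  obtain ⟨H1, H2, H3⟩ := pv_scan_char pvTable
    (fun p i => (pvKey p == s.getD i ' ') && PySem.Chars.startswith (List.drop i s) p.1.toList)
    (List.range s.length) 5
  rw [← hflat] at H1 H2 H3
  have hMiff : ∀ p ∈ pvTable,
      ((∃ i ∈ List.range s.length, ((pvKey p == s.getD i ' ') && PySem.Chars.startswith (List.drop i s) p.1.toList) = true) ↔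
        PySem.Chars.isIn p.1.toList s = true) := by
    intro p hp
    have hne := pvTable_ne_nil_keys p hp
    rw [← pv_exists_pos_iff_isIn s p.1.toList hne]
    constructor
    · rintro ⟨i, hi, h⟩
      exact ⟨i, hi, (Bool.and_eq_true_iff.mp h).2⟩
    · rintro ⟨i, hi, h⟩
      have hk := pv_startswith_key s p.1.toList i (List.mem_range.mp hi) hne h
      exact ⟨i, hi, by unfold pvKey; rw [hk]; simp [h]⟩
  have H2' : best = 5 ∨ ∃ p ∈ pvTable, PySem.Chars.isIn p.1.toList s = true ∧ best = p.2 := by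
    rcases H2 with h | ⟨p, hp, hm, he⟩
    · exact Or.inl h
    · exact Or.inr ⟨p, hp, (hMiff p hp).mp hm, he⟩
  have H3' : ∀ p ∈ pvTable, PySem.Chars.isIn p.1.toList s = true → best ≤ p.2 :=
    fun p hp hin => H3 p hp ((hMiff p hp).mpr hin)
  have hcat : ∀ (L : List String) (c : Int), (∀ k, k ∈ L → (k, c) ∈ pvTable) →
      (∀ p, p ∈ pvTable → p.2 = c → p.1 ∈ L) →
      (L.any (fun k => PySem.Str.isIn k (PySem.Str.lower f)) = true ↔
        ∃ p ∈ pvTable, p.2 = c ∧ PySem.Chars.isIn p.1.toList s = true) := by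
    intro L c hin hout
    simp only [List.any_eq_true]
    constructor
    · rintro ⟨k, hk, hk2⟩
      refine ⟨(k, c), hin k hk, rfl, ?_⟩
      simpa [hs] using hk2
    · rintro ⟨p, hp, hc, hin2⟩
      exact ⟨p.1, hout p hp hc, by simpa [hs] using hin2⟩
  have h0 := hcat kwInfo 0 (fun k hk => (mem_pvTable_iff _).mpr (Or.inl ⟨hk, rfl⟩))
    (fun p hp hc => by rcases (mem_pvTable_iff p).mp hp with ⟨h, h2⟩ | ⟨h, h2⟩ | ⟨h, h2⟩ | ⟨h, h2⟩ | ⟨h, h2⟩ <;>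
      first | exact h | (exfalso; omega))
  have h1 := hcat kwNav 1 (fun k hk => (mem_pvTable_iff _).mpr (Or.inr (Or.inl ⟨hk, rfl⟩)))
    (fun p hp hc => by rcases (mem_pvTable_iff p).mp hp with ⟨h, h2⟩ | ⟨h, h2⟩ | ⟨h, h2⟩ | ⟨h, h2⟩ | ⟨h, h2⟩ <;>
      first | exact h | (exfalso; omega))
  have h2 := hcat kwLocal 2 (fun k hk => (mem_pvTable_iff _).mpr (Or.inr (Or.inr (Or.inl ⟨hk, rfl⟩))))
    (fun p hp hc => by rcases (mem_pvTable_iff p).mp hp with ⟨h, h2⟩ | ⟨h, h2⟩ | ⟨h, h2⟩ | ⟨h, h2⟩ | ⟨h, h2⟩ <;>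
      first | exact h | (exfalso; omega))
  have h3 := hcat kwComm 3 (fun k hk => (mem_pvTable_iff _).mpr (Or.inr (Or.inr (Or.inr (Or.inl ⟨hk, rfl⟩)))))
    (fun p hp hc => by rcases (mem_pvTable_iff p).mp hp with ⟨h, h2⟩ | ⟨h, h2⟩ | ⟨h, h2⟩ | ⟨h, h2⟩ | ⟨h, h2⟩ <;>
      first | exact h | (exfalso; omega))
  have h4 := hcat kwTrans 4 (fun k hk => (mem_pvTable_iff _).mpr (Or.inr (Or.inr (Or.inr (Or.inr ⟨hk, rfl⟩)))))
    (fun p hp hc => by rcases (mem_pvTable_iff p).mp hp with ⟨h, h2⟩ | ⟨h, h2⟩ | ⟨h, h2⟩ | ⟨h, h2⟩ | ⟨h, h2⟩ <;>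
      first | exact h | (exfalso; omega))
  by_cases c0 : kwInfo.any (fun k => PySem.Str.isIn k (PySem.Str.lower f)) = true
  · obtain ⟨p, hp, hc, hin⟩ := h0.mp c0
    have hle : best ≤ 0 := hc ▸ H3' p hp hin
    have hge : 0 ≤ best := by
      rcases H2' with h | ⟨p', hp', hin', he⟩
      · omega
      · have := pvTable_rank_nonneg p' hp'; omega
    have : best = 0 := le_antisymm hle hge
    rw [if_pos c0, this]; decide
  · rw [if_neg c0]
    by_cases c1 : kwNav.any (fun k => PySem.Str.isIn k (PySem.Str.lower f)) = true
    · obtain ⟨p, hp, hc, hin⟩ := h1.mp c1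
      have hle : best ≤ 1 := hc ▸ H3' p hp hin
      have : best = 1 := by
        rcases H2' with h | ⟨p', hp', hin', he⟩
        · omega
        · have hr := pvTable_rank_cases p' hp'
          have hne0 : p'.2 ≠ 0 := fun h0' => c0 (h0.mpr ⟨p', hp', h0', hin'⟩)
          omega
      rw [if_pos c1, this]; decide
    · rw [if_neg c1]
      by_cases c2 : kwLocal.any (fun k => PySem.Str.isIn k (PySem.Str.lower f)) = true
      · obtain ⟨p, hp, hc, hin⟩ := h2.mp c2
        have hle : best ≤ 2 := hc ▸ H3' p hp hin
        have : best = 2 := by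
          rcases H2' with h | ⟨p', hp', hin', he⟩
          · omega
          · have hr := pvTable_rank_cases p' hp'
            have hne0 : p'.2 ≠ 0 := fun h' => c0 (h0.mpr ⟨p', hp', h', hin'⟩)
            have hne1 : p'.2 ≠ 1 := fun h' => c1 (h1.mpr ⟨p', hp', h', hin'⟩)
            omega
        rw [if_pos c2, this]; decide
      · rw [if_neg c2]
        by_cases c3 : kwComm.any (fun k => PySem.Str.isIn k (PySem.Str.lower f)) = true
        · obtain ⟨p, hp, hc, hin⟩ := h3.mp c3
          have hle : best ≤ 3 := hc ▸ H3' p hp hin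
          have : best = 3 := by
            rcases H2' with h | ⟨p', hp', hin', he⟩
            · omega
            · have hr := pvTable_rank_cases p' hp'
              have hne0 : p'.2 ≠ 0 := fun h' => c0 (h0.mpr ⟨p', hp', h', hin'⟩)
              have hne1 : p'.2 ≠ 1 := fun h' => c1 (h1.mpr ⟨p', hp', h', hin'⟩)
              have hne2 : p'.2 ≠ 2 := fun h' => c2 (h2.mpr ⟨p', hp', h', hin'⟩)
              omega
          rw [if_pos c3, this]; decide
        · rw [if_neg c3]
          by_cases c4 : kwTrans.any (fun k => PySem.Str.isIn k (PySem.Str.lower f)) = true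
          · obtain ⟨p, hp, hc, hin⟩ := h4.mp c4
            have hle : best ≤ 4 := hc ▸ H3' p hp hin
            have : best = 4 := by
              rcases H2' with h | ⟨p', hp', hin', he⟩
              · omega
              · have hr := pvTable_rank_cases p' hp'
                have hne0 : p'.2 ≠ 0 := fun h' => c0 (h0.mpr ⟨p', hp', h', hin'⟩)
                have hne1 : p'.2 ≠ 1 := fun h' => c1 (h1.mpr ⟨p', hp', h', hin'⟩)
                have hne2 : p'.2 ≠ 2 := fun h' => c2 (h2.mpr ⟨p', hp', h', hin'⟩)
                have hne3 : p'.2 ≠ 3 := fun h' => c3 (h3.mpr ⟨p', hp', h', hin'⟩)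
                omega
            rw [if_pos c4, this]; decide
          · rw [if_neg c4]
            have : best = 5 := by
              rcases H2' with h | ⟨p', hp', hin', he⟩
              · exact h
              · exfalso
                rcases pvTable_rank_cases p' hp' with h' | h' | h' | h' | h'
                · exact c0 (h0.mpr ⟨p', hp', h', hin'⟩)
                · exact c1 (h1.mpr ⟨p', hp', h', hin'⟩)
                · exact c2 (h2.mpr ⟨p', hp', h', hin'⟩)
                · exact c3 (h3.mpr ⟨p', hp', h', hin'⟩)
                · exact c4 (h4.mpr ⟨p', hp', h', hin'⟩)
            rw [this]; decide

-- ===== VERDICT (by name: the statement is the Claim_ definition above) =====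
theorem sort_by_keyword_feature_spec : Claim_equal_sort_by_keyword_feature := by
  intro f _
  show sort_by_keyword_feature f = sort_by_keyword_feature_alt f
  unfold sort_by_keyword_feature sort_by_keyword_feature_alt
  rw [pvCatsB_eq]
  exact pv_core f _ rfl
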